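-- pv_equiv track=rewrite | github.com/Zqs0527/codesignal | sortByHeight.py | solution
-- ===== SOURCE A (Python) =====
-- def solution(n):
--     sorted_list = sorted([i for i in n if i!=-1])
--     pos = 0
--
--     for i in range(len(n)):
--         if n[i]== -1:
--             continue
--         n[i] = sorted_list[pos]
--         pos += 1
--
--
--     return n
-- ===== SOURCE B (Python) =====
-- def solution(n):
--     def merge(a, b):
--         out = []
--         i = j = 0
--         while i < len(a) and j < len(b):
--             if a[i] <= b[j]:
--                 out.append(a[i])
--                 i += 1
--             else:
--                 out.append(b[j])
--                 j += 1
--         out.extend(a[i:])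
--         out.extend(b[j:])
--         return out
--
--     def msort(xs):
--         if len(xs) <= 1:
--             return xs
--         m = len(xs) // 2
--         return merge(msort(xs[:m]), msort(xs[m:]))
--
--     vals = msort([v for v in n if v != -1])
--     for i in range(len(n) - 1, -1, -1):
--         if n[i] != -1:
--             n[i] = vals.pop()
--     return n
-- ===== Notes on version B (the rewrite author's own statement) =====
-- stated objective: alternative
-- what changed: Replaces the library sort plus forward position-counter refill with a hand-rolled recursive merge sort of the non-(-1) values and a backward scatter pass that walks the indices right-to-left popping the largest remaining value into each non-(-1) slot.
import Mathlib
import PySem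

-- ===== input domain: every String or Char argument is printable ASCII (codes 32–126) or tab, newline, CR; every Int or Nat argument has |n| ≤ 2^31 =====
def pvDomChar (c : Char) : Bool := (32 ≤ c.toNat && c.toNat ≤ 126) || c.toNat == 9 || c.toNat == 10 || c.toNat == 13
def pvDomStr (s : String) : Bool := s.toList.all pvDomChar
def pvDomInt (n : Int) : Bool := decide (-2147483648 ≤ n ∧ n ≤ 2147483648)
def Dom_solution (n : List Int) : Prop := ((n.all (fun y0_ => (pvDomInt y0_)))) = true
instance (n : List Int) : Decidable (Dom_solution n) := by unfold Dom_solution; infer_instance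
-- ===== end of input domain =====

-- B replaces A's library sort + forward counter refill by a hand-rolled recursive merge sort and a
-- right-to-left scatter popping the largest remaining value (alternative algorithm, same result);
-- both mutate n in place and return the same list object.

-- ===== PORT A =====
-- for i in range(len(n)): if n[i]==-1: continue; n[i]=sorted_list[pos]; pos+=1
-- sorted_list[pos] is always in range (one sorted value per non-(-1) entry), so .getD 0 is never the default.
def solution (n : List Int) : List Int :=
  let sorted_list := PySem.List.sorted (n.filter (fun i => i != -1)) (fun x => x) false
  ((PySem.List.pyRange 0 (n.length : Int) 1).foldl
    (fun (st : List Int × Int) i =>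
      if (PySem.List.pyGet? st.1 i).getD 0 = -1 then st
      else (st.1.set i.toNat ((PySem.List.pyGet? sorted_list st.2).getD 0), st.2 + 1))
    (n, (0 : Int))).1

-- ===== PORT B =====
-- the inner while loop of merge(a, b): take the smaller head, then extend with the leftovers.
def mergeB (a b : List Int) : List Int :=
  match a, b with
  | [], b => b
  | a, [] => a
  | x :: a', y :: b' => if x ≤ y then x :: mergeB a' (y :: b') else y :: mergeB (x :: a') b'

-- msort(xs): split at len//2 (xs[:m] / xs[m:] = take/drop, m nonneg and in range), merge the halves.
def msortB (xs : List Int) : List Int :=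
  if xs.length ≤ 1 then xs
  else
    mergeB (msortB (xs.take (xs.length / 2))) (msortB (xs.drop (xs.length / 2)))
termination_by xs.length
decreasing_by
  · simp only [List.length_take]; omega
  · simp only [List.length_drop]; omega

-- vals.pop() is ported as getLast?/dropLast; the loop never pops an empty list
-- (one value per non-(-1) entry), so .getD 0 is never the default.
def solution_alt (n : List Int) : List Int :=
  let vals := msortB (n.filter (fun v => v != -1))
  ((PySem.List.pyRange ((n.length : Int) - 1) (-1) (-1)).foldl
    (fun (st : List Int × List Int) i =>
      if (PySem.List.pyGet? st.1 i).getD 0 != -1 then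
        (st.1.set i.toNat (st.2.getLast?.getD 0), st.2.dropLast)
      else st)
    (n, vals)).1

-- ===== PRECONDITION & SPEC =====
def Spec_solution (n : List Int) (out : List Int) : Prop := out = solution_alt n
instance (n : List Int) (out : List Int) : Decidable (Spec_solution n out) := by unfold Spec_solution; infer_instance

-- ===== CLAIM (what is proved, stated in full; the proofs are below) =====
def Claim_equal_solution : Prop := ∀ (n : List Int), Dom_solution n → Spec_solution n (solution n)

-- ===== LEMMAS AND PROOFS =====

-- Functional form of the scatter: assign sorted values front-to-back to the non-(-1) slots.
-- Both loops are proved equal to this.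
def altGo (xs vs : List Int) : List Int :=
  match xs, vs with
  | [], _ => []
  | x :: xs', vs =>
    if x == -1 then x :: altGo xs' vs
    else
      match vs with
      | v :: vs' => v :: altGo xs' vs'
      | [] => []

-- A's loop over the index range, with a processed prefix `a` already written, equals the
-- structural scatter `altGo` applied to the unprocessed suffix `b`, drawing values from S at pos p.
theorem loopA_spec (S : List Int) (b : List Int) :
    ∀ (a : List Int) (p : Int), 0 ≤ p →
      (b.countP (fun x => x != -1) : Int) ≤ (S.length : Int) - p →
      (PySem.List.pyRange (a.length : Int) ((a.length : Int) + (b.length : Int)) 1).foldl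
        (fun (st : List Int × Int) i =>
          if (PySem.List.pyGet? st.1 i).getD 0 = -1 then st
          else (st.1.set i.toNat ((PySem.List.pyGet? S st.2).getD 0), st.2 + 1))
        (a ++ b, p)
      = (a ++ altGo b (S.drop p.toNat), p + (b.countP (fun x => x != -1) : Int)) := by
  induction b with
  | nil =>
    intro a p hp _
    rw [show (a.length : Int) + (([] : List Int).length : Int) = (a.length : Int) by simp]
    simp [PySem.List.pyRange_one_eq_nil (le_refl _), altGo]
  | cons x xs ih =>
    intro a p hp hcnt
    rw [PySem.List.pyRange_one_cons (by simp only [List.length_cons]; push_cast; omega)]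
    simp only [List.foldl_cons]
    rw [show PySem.List.pyGet? (a ++ x :: xs) (a.length : Int) = some x from
      PySem.List.pyGet?_append_length a xs x]
    by_cases hx : x = -1
    · subst hx
      rw [Option.getD_some, if_pos rfl]
      have hcnt2 : (xs.countP (fun x => x != -1) : Int) ≤ (S.length : Int) - p := by
        simp only [List.countP_cons] at hcnt
        omega
      rw [show ((-1 : Int) :: xs).length = ((a ++ [(-1:Int)]).length + xs.length) - a.length by
            simp; omega,
          show a ++ (-1:Int) :: xs = (a ++ [(-1:Int)]) ++ xs by simp]
      rw [show ((a.length : Int) + (((a ++ [(-1:Int)]).length + xs.length - a.length : Nat) : Int))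
            = (((a ++ [(-1:Int)]).length : Int) + (xs.length : Int)) by simp; omega,
          show ((a.length : Int) + 1) = ((a ++ [(-1:Int)]).length : Int) by simp]
      rw [ih (a ++ [(-1:Int)]) p hp hcnt2]
      simp [altGo]
    · have hxb : (x != -1) = true := by simp [hx]
      rw [Option.getD_some, if_neg hx]
      have hcnt' : (xs.countP (fun x => x != -1) : Int) + 1 ≤ (S.length : Int) - p := by
        simp only [List.countP_cons, hxb, if_pos] at hcnt
        push_cast at hcnt
        omega
      have hplt : p.toNat < S.length := by omega
      have hget : (PySem.List.pyGet? S p).getD 0 = S[p.toNat] := by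
        rw [PySem.List.pyGet?_of_nonneg S hp]
        simp [List.getElem?_eq_getElem hplt]
      have hdrop : S.drop p.toNat = S[p.toNat] :: S.drop (p.toNat + 1) :=
        List.drop_eq_getElem_cons hplt
      rw [hget]
      have hset : (a ++ x :: xs).set ((a.length : Int)).toNat S[p.toNat]
          = (a ++ [S[p.toNat]]) ++ xs := by
        rw [show ((a.length : Int)).toNat = a.length by simp,
            List.set_append_right _ _ (le_refl _)]
        simp
      rw [hset]
      rw [show ((x :: xs).length) = ((a ++ [S[p.toNat]]).length + xs.length) - a.length by simp; omega]
      rw [show ((a.length : Int) + (((a ++ [S[p.toNat]]).length + xs.length - a.length : Nat) : Int))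
            = (((a ++ [S[p.toNat]]).length : Int) + (xs.length : Int)) by simp; omega,
          show ((a.length : Int) + 1) = ((a ++ [S[p.toNat]]).length : Int) by simp]
      rw [ih (a ++ [S[p.toNat]]) (p + 1) (by omega) (by omega)]
      have hp1 : (p + 1).toNat = p.toNat + 1 := by omega
      simp only [hp1, altGo, hxb, hdrop, List.countP_cons, if_pos, List.append_assoc,
        List.cons_append, List.nil_append, Prod.mk.injEq]
      constructor
      · simp [hx]
      · push_cast
        ring

-- mergeB interleaves its arguments: a permutation of a ++ b.
theorem mergeB_perm (a b : List Int) : (mergeB a b).Perm (a ++ b) := by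
  induction a, b using mergeB.induct with
  | case1 b => simp [mergeB]
  | case2 a h => simp [mergeB]
  | case3 x a' y b' h ih =>
    simp only [mergeB, if_pos h, List.cons_append]
    exact ih.cons x
  | case4 x a' y b' h ih =>
    simp only [mergeB, if_neg h]
    exact (ih.cons y).trans List.perm_middle.symm

theorem mergeB_sorted (a b : List Int) (ha : a.Pairwise (· ≤ ·)) (hb : b.Pairwise (· ≤ ·)) :
    (mergeB a b).Pairwise (· ≤ ·) := by
  induction a, b using mergeB.induct with
  | case1 b => simpa [mergeB] using hb
  | case2 a h => simpa [mergeB] using ha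
  | case3 x a' y b' h ih =>
    simp only [mergeB, if_pos h]
    rw [List.pairwise_cons] at ha ⊢
    refine ⟨?_, ih ha.2 hb⟩
    intro z hz
    have hz' : z ∈ a' ++ y :: b' := (mergeB_perm a' (y :: b')).mem_iff.mp hz
    rcases List.mem_append.mp hz' with hz' | hz'
    · exact ha.1 z hz'
    · rcases List.mem_cons.mp hz' with rfl | hz'
      · exact h
      · exact le_trans h ((List.pairwise_cons.mp hb).1 z hz')
  | case4 x a' y b' h ih =>
    simp only [mergeB, if_neg h]
    rw [List.pairwise_cons] at hb ⊢
    refine ⟨?_, ih ha hb.2⟩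
    intro z hz
    have hz' : z ∈ (x :: a') ++ b' := (mergeB_perm (x :: a') b').mem_iff.mp hz
    rcases List.mem_append.mp hz' with hz' | hz'
    · rcases List.mem_cons.mp hz' with rfl | hz'
      · omega
      · exact le_trans (by omega) ((List.pairwise_cons.mp ha).1 z hz')
    · exact hb.1 z hz'

theorem msortB_perm (xs : List Int) : (msortB xs).Perm xs := by
  induction xs using msortB.induct with
  | case1 xs h => rw [msortB, if_pos h]
  | case2 xs h ih1 ih2 =>
    rw [msortB, if_neg h]
    have hp := (mergeB_perm (msortB (xs.take (xs.length / 2))) (msortB (xs.drop (xs.length / 2)))).trans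
      (ih1.append ih2)
    rwa [List.take_append_drop] at hp

theorem msortB_sorted (xs : List Int) : (msortB xs).Pairwise (· ≤ ·) := by
  induction xs using msortB.induct with
  | case1 xs h =>
    rw [msortB, if_pos h]
    match xs, h with
    | [], _ => simp
    | [x], _ => simp
  | case2 xs h ih1 ih2 =>
    rw [msortB, if_neg h]
    exact mergeB_sorted _ _ ih1 ih2

-- hence B's value list is exactly A's sorted(filter)
theorem vals_eq_sorted (n : List Int) :
    msortB (n.filter (fun v => v != -1))
      = PySem.List.sorted (n.filter (fun i => i != -1)) (fun x => x) false := by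
  exact (PySem.List.sorted_id_eq_of_perm_of_pairwise _ _
    (msortB_perm (n.filter (fun v => v != -1)))
    (msortB_sorted (n.filter (fun v => v != -1)))).symm

-- altGo over a snoc: the trailing -1 stays, once the value list is exactly consumed.
theorem altGo_snoc_neg (b : List Int) :
    ∀ (vals : List Int), b.countP (fun x => x != -1) = vals.length →
      altGo (b ++ [-1]) vals = altGo b vals ++ [-1] := by
  induction b with
  | nil =>
    intro vals h
    have : vals = [] := List.eq_nil_of_length_eq_zero (by simpa using h.symm)
    subst this; simp [altGo]
  | cons y b' ih =>
    intro vals h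
    by_cases hy : y = -1
    · subst hy
      simp only [List.countP_cons] at h
      simp only [List.cons_append, altGo, beq_self_eq_true, if_pos]
      rw [ih vals (by simpa using h)]
    · have hyb : (y != -1) = true := by simp [hy]
      simp only [List.countP_cons, hyb, if_pos] at h
      match vals, h with
      | v :: vs, h =>
        simp only [List.cons_append, altGo, show (y == -1) = false by simp [hy]]
        simp only [Bool.false_eq_true, if_false]
        rw [ih vs (by simpa using h)]
        simp

-- altGo over a snoc of a non-(-1) slot: it receives the last value, once the rest is exactly consumed.
theorem altGo_snoc_pos (x v : Int) (hx : x ≠ -1) (b : List Int) :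
    ∀ (vs : List Int), b.countP (fun y => y != -1) = vs.length →
      altGo (b ++ [x]) (vs ++ [v]) = altGo b vs ++ [v] := by
  induction b with
  | nil =>
    intro vs h
    have : vs = [] := List.eq_nil_of_length_eq_zero (by simpa using h.symm)
    subst this; simp [altGo, hx]
  | cons y b' ih =>
    intro vs h
    by_cases hy : y = -1
    · subst hy
      simp only [List.countP_cons] at h
      simp only [List.cons_append, altGo, beq_self_eq_true, if_pos]
      rw [ih vs (by simpa using h)]
    · have hyb : (y != -1) = true := by simp [hy]
      simp only [List.countP_cons, hyb, if_pos] at h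
      match vs, h with
      | w :: vs', h =>
        simp only [List.cons_append, altGo, show (y == -1) = false by simp [hy]]
        simp only [Bool.false_eq_true, if_false]
        rw [ih vs' (by simpa using h)]
        simp

-- B's backward loop: processing the suffix `b` (whose indices lie between a.length and
-- a.length+b.length-1) turns it into altGo b vals and drains vals, leaving the range over `a`.
theorem loopB_spec (b : List Int) :
    ∀ (vals a tail : List Int), b.countP (fun x => x != -1) = vals.length →
      (PySem.List.pyRange ((a.length : Int) + (b.length : Int) - 1) (-1) (-1)).foldl
        (fun (st : List Int × List Int) i =>
          if (PySem.List.pyGet? st.1 i).getD 0 != -1 then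
            (st.1.set i.toNat (st.2.getLast?.getD 0), st.2.dropLast)
          else st)
        (a ++ b ++ tail, vals)
      = (PySem.List.pyRange ((a.length : Int) - 1) (-1) (-1)).foldl
          (fun (st : List Int × List Int) i =>
            if (PySem.List.pyGet? st.1 i).getD 0 != -1 then
              (st.1.set i.toNat (st.2.getLast?.getD 0), st.2.dropLast)
            else st)
          (a ++ altGo b vals ++ tail, []) := by
  induction b using List.reverseRecOn with
  | nil =>
    intro vals a tail h
    have : vals = [] := List.eq_nil_of_length_eq_zero (by simpa using h.symm)
    subst this
    simp [altGo]
  | append_singleton b' x ih =>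
    intro vals a tail h
    have hi : ((a.length : Int) + ((b' ++ [x]).length : Int) - 1) = (a.length : Int) + (b'.length : Int) := by
      simp; omega
    rw [hi, PySem.List.pyRange_neg_one_cons (by omega)]
    simp only [List.foldl_cons]
    have hget : PySem.List.pyGet? (a ++ (b' ++ [x]) ++ tail) ((a.length : Int) + (b'.length : Int))
        = some x := by
      rw [show a ++ (b' ++ [x]) ++ tail = (a ++ b') ++ x :: tail by simp,
          show (a.length : Int) + (b'.length : Int) = ((a ++ b').length : Int) by simp]
      exact PySem.List.pyGet?_append_length (a ++ b') tail x
    rw [hget, Option.getD_some]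
    by_cases hx : x = -1
    · subst hx
      rw [if_neg (by simp)]
      simp only [List.countP_append, List.countP_singleton] at h
      norm_num at h
      have := ih vals a ((-1 : Int) :: tail) h
      rw [show a ++ (b' ++ [-1]) ++ tail = a ++ b' ++ ((-1:Int) :: tail) by simp,
          show (a.length : Int) + (b'.length : Int) = (a.length : Int) + (b'.length : Int) - 1 + 1 by ring]
      rw [show (a.length : Int) + (b'.length : Int) - 1 + 1 - 1 = (a.length : Int) + (b'.length : Int) - 1 by ring]
      rw [this, altGo_snoc_neg b' vals h]
      simp
    · have hxb : (x != -1) = true := by simp [hx]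
      rw [if_pos (by simp [hx])]
      simp only [List.countP_append, List.countP_singleton, hxb, if_pos] at h
      have hlen : 0 < vals.length := by omega
      have hvne : vals ≠ [] := by intro hh; subst hh; simp at hlen
      obtain ⟨vs, v, hvv⟩ : ∃ vs v, vals = vs ++ [v] :=
        ⟨vals.dropLast, vals.getLast hvne, (List.dropLast_concat_getLast hvne).symm⟩
      subst hvv
      have hvs : b'.countP (fun y => y != -1) = vs.length := by
        simp at h; omega
      have hlast : ((vs ++ [v]).getLast?).getD 0 = v := by simp
      have hdl : (vs ++ [v]).dropLast = vs := by simp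
      have hsetnat : ((a.length : Int) + (b'.length : Int)).toNat = (a ++ b').length := by
        simp; omega
      have hset : (a ++ (b' ++ [x]) ++ tail).set ((a.length : Int) + (b'.length : Int)).toNat v
          = a ++ b' ++ (v :: tail) := by
        rw [hsetnat, show a ++ (b' ++ [x]) ++ tail = (a ++ b') ++ x :: tail by simp,
            List.set_append_right _ _ (le_refl _)]
        simp
      rw [hlast, hdl, hset]
      rw [show (a.length : Int) + (b'.length : Int) - 1
            = (a.length : Int) + (b'.length : Int) - 1 by rfl]
      have := ih vs a (v :: tail) hvs
      rw [this, altGo_snoc_pos x v hx b' vs hvs]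
      simp

-- ===== VERDICT (by name: the statement is the Claim_ definition above) =====
theorem solution_spec : Claim_equal_solution := by
  intro n _
  unfold Spec_solution solution solution_alt
  have hS := loopA_spec (PySem.List.sorted (n.filter (fun i => i != -1)) (fun x => x) false)
      n [] 0 (le_refl 0)
      (by simp [List.countP_eq_length_filter])
  have hA : (((PySem.List.pyRange 0 (n.length : Int) 1).foldl
      (fun (st : List Int × Int) i =>
        if (PySem.List.pyGet? st.1 i).getD 0 = -1 then st
        else (st.1.set i.toNat
          ((PySem.List.pyGet? (PySem.List.sorted (n.filter (fun i => i != -1)) (fun x => x) false) st.2).getD 0),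
          st.2 + 1))
      (n, (0 : Int))).1)
      = altGo n (PySem.List.sorted (n.filter (fun i => i != -1)) (fun x => x) false) := by
    simpa using congrArg Prod.fst hS
  rw [hA, ← vals_eq_sorted]
  show altGo n (msortB (n.filter (fun v => v != -1)))
      = ((PySem.List.pyRange ((n.length : Int) - 1) (-1) (-1)).foldl
          (fun (st : List Int × List Int) i =>
            if (PySem.List.pyGet? st.1 i).getD 0 != -1 then
              (st.1.set i.toNat (st.2.getLast?.getD 0), st.2.dropLast)
            else st)
          (n, msortB (n.filter (fun v => v != -1)))).1
  have hcnt : n.countP (fun x => x != -1)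
      = (msortB (n.filter (fun v => v != -1))).length := by
    rw [(msortB_perm _).length_eq, List.countP_eq_length_filter]
  have hB := loopB_spec n (msortB (n.filter (fun v => v != -1))) [] [] hcnt
  simp only [List.nil_append, List.append_nil, List.length_nil, Nat.cast_zero, zero_add] at hB
  rw [hB]
  rw [PySem.List.pyRange_neg_one_eq_nil (by omega)]
  simp
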